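-- pv_equiv track=rewrite | github.com/copyerrr/Coding-Test | 튜플.py | solution
-- ===== SOURCE A (Python) =====
-- from collections import Counter
--
-- def solution(s):
--     answer = []
--
--     num = 0
--     for i in s:
--
--         if( '0' <= i <= '9'):
--             num *= 10
--             num += int(i)
--         elif(num>0):
--             answer.append(num)
--             num = 0
--
--     answer = Counter(answer)
--
--     result = sorted(answer.items(), key=lambda x: x[1], reverse=True)
--     ans = []
--
--     for i in result:
--         ans.append(i[0])
--
--     return ans
-- ===== SOURCE B (Python) =====
-- def solution(s):
--     # One fused pass: parse each number and tally it in a dict as soon as it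
--     # is complete; then order the distinct values by multiplicity using a
--     # counting sort over buckets indexed by count (largest count first).
--     counts = {}
--     num = 0
--     for c in s:
--         if '0' <= c <= '9':
--             num = num * 10 + int(c)
--         else:
--             if num > 0:
--                 counts[num] = counts.get(num, 0) + 1
--             num = 0
--     if not counts:
--         return []
--     buckets = [[] for _ in range(max(counts.values()) + 1)]
--     for v, c in counts.items():
--         buckets[c].append(v)
--     ans = []
--     for bucket in reversed(buckets):
--         ans += bucket
--     return ans
-- ===== Notes on version B (the rewrite author's own statement) =====
-- stated objective: alternative
-- what changed: One fused pass tallies each completed number directly in a value-to-count dict (no intermediate run list, no Counter), and the frequency-descending order is produced by a counting sort over buckets indexed by count instead of a comparison sort.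
import Mathlib
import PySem

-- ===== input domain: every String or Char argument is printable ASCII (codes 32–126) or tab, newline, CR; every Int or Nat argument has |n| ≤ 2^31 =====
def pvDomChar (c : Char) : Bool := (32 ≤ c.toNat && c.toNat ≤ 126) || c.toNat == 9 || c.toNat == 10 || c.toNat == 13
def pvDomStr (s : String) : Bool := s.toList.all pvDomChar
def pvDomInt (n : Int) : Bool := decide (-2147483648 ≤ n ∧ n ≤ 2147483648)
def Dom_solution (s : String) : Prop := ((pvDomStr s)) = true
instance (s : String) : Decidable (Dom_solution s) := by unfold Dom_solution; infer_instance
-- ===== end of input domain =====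

-- B tallies each completed number directly in a value→count dict during one pass and
-- orders the distinct values by a counting sort over buckets indexed by count
-- (objective: alternative).

-- ===== PORT A =====
-- char-by-char scan with (answer, num); Counter; items sorted by count descending; keys.
-- int(i) for a digit char i is exactly (i.toNat : Int) - 48 on the digit branch.
def solution (s : String) : List Int :=
  let st := s.toList.foldl
    (fun (st : List Int × Int) i =>
      if '0' ≤ i ∧ i ≤ '9' then (st.1, st.2 * 10 + ((i.toNat : Int) - 48))
      else if 0 < st.2 then (st.1 ++ [st.2], 0)
      else st)
    ([], 0)
  let answer := PySem.Dict.counter st.1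
  let result := PySem.List.sorted answer.items (fun x => x.2) true
  result.foldl (fun ans i => ans ++ [i.1]) []

-- ===== PORT B =====
-- one fused scan building counts (dict value → count), flushed on delimiters; then
-- counting sort: buckets[c] lists the values of count c, emitted from the largest
-- count down.
def solution_alt (s : String) : List Int :=
  let st := s.toList.foldl
    (fun (st : PySem.Dict Int Int × Int) c =>
      if '0' ≤ c ∧ c ≤ '9' then (st.1, st.2 * 10 + ((c.toNat : Int) - 48))
      else if 0 < st.2 then (st.1.modify st.2 0 (· + 1), 0)
      else (st.1, 0))
    (PySem.Dict.empty, 0)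
  let counts := st.1
  match PySem.List.max? counts.values (fun v => v) with
  | none => []
  | some M =>
    let buckets0 := (PySem.List.pyRange 0 (M + 1) 1).map (fun _ => ([] : List Int))
    let buckets := counts.items.foldl
      (fun bks p => PySem.List.pySetD bks p.2 (PySem.List.pyGetD bks p.2 [] ++ [p.1])) buckets0
    buckets.reverse.foldl (fun a b => a ++ b) []

-- ===== PRECONDITION & SPEC =====
def Spec_solution (s : String) (out : List Int) : Prop := out = solution_alt s
instance (s : String) (out : List Int) : Decidable (Spec_solution s out) := by unfold Spec_solution; infer_instance

-- ===== CLAIM (what is proved, stated in full; the proofs are below) =====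
def Claim_equal_solution : Prop := ∀ (s : String), Dom_solution s → Spec_solution s (solution s)

-- ===== LEMMAS AND PROOFS =====

-- the list of flushed (delimiter-terminated positive) digit-run values
def pvRuns : List Char → Int → List Int
  | [], _ => []
  | c :: t, num =>
    if '0' ≤ c ∧ c ≤ '9' then pvRuns t (num * 10 + ((c.toNat : Int) - 48))
    else if 0 < num then num :: pvRuns t 0 else pvRuns t num

-- the running number, viewed on its own
def pvStep (m : Int) (c : Char) : Int :=
  if '0' ≤ c ∧ c ≤ '9' then m * 10 + ((c.toNat : Int) - 48) else 0

theorem foldlA_eq_pvRuns (l : List Char) (ans : List Int) (num : Int) :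
    (l.foldl
      (fun (st : List Int × Int) i =>
        if '0' ≤ i ∧ i ≤ '9' then (st.1, st.2 * 10 + ((i.toNat : Int) - 48))
        else if 0 < st.2 then (st.1 ++ [st.2], 0)
        else st)
      (ans, num)).1 = ans ++ pvRuns l num := by
  induction l generalizing ans num with
  | nil => simp [pvRuns]
  | cons c t ih =>
    by_cases hd : '0' ≤ c ∧ c ≤ '9'
    · simp [pvRuns, hd, ih]
    · by_cases hp : (0 : Int) < num
      · simp [pvRuns, hd, hp, ih]
      · simp [pvRuns, hd, hp, ih]

theorem foldlB_eq (l : List Char) (d : PySem.Dict Int Int) (num : Int) (h : 0 ≤ num) :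
    l.foldl
      (fun (st : PySem.Dict Int Int × Int) c =>
        if '0' ≤ c ∧ c ≤ '9' then (st.1, st.2 * 10 + ((c.toNat : Int) - 48))
        else if 0 < st.2 then (st.1.modify st.2 0 (· + 1), 0)
        else (st.1, 0))
      (d, num)
    = ((pvRuns l num).foldl (fun d x => d.modify x 0 (· + 1)) d, l.foldl pvStep num) := by
  induction l generalizing d num with
  | nil => simp [pvRuns]
  | cons c t ih =>
    by_cases hd : '0' ≤ c ∧ c ≤ '9'
    · have h48 : (48 : Nat) ≤ c.toNat := hd.1
      have h' : (0 : Int) ≤ num * 10 + ((c.toNat : Int) - 48) := by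
        have : (0:Int) ≤ num * 10 := by positivity
        omega
      simp only [List.foldl_cons, if_pos hd, pvRuns, pvStep]
      exact ih _ _ h'
    · by_cases hp : (0 : Int) < num
      · simp only [List.foldl_cons, if_neg hd, if_pos hp, pvRuns, pvStep]
        rw [ih _ _ le_rfl]
      · have h0 : num = 0 := le_antisymm (not_lt.mp hp) h
        subst h0
        simp only [List.foldl_cons, if_neg hd, if_neg hp, pvRuns, pvStep]
        rw [ih _ _ le_rfl]

-- insertBy skips a prefix it does not go before
theorem insertBy_append_not {α : Type} (b : α → α → Bool) (x : α) (p q : List α)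
    (h : ∀ y ∈ p, b x y = false) :
    PySem.List.insertBy b x (p ++ q) = p ++ PySem.List.insertBy b x q := by
  induction p with
  | nil => simp
  | cons y t ih =>
    have hy : b x y = false := h y List.mem_cons_self
    simp only [List.cons_append, PySem.List.insertBy, hy, Bool.false_eq_true]
    rw [ih (fun z hz => h z (List.mem_cons_of_mem _ hz))]
    simp

-- insertBy lands at the front of a list it goes before entirely
theorem insertBy_front {α : Type} (b : α → α → Bool) (x : α) (q : List α)
    (h : ∀ y ∈ q, b x y = true) :
    PySem.List.insertBy b x q = x :: q := by
  cases q with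
  | nil => rfl
  | cons y t => simp [PySem.List.insertBy, h y List.mem_cons_self]

theorem flatMap_filter_irrelevant (cs : List Int) (l : List (Int × Int)) (x : Int × Int)
    (h : ∀ c ∈ cs, ¬ x.2 = c) :
    cs.flatMap (fun c => (l ++ [x]).filter (fun p => decide (p.2 = c)))
      = cs.flatMap (fun c => l.filter (fun p => decide (p.2 = c))) := by
  induction cs with
  | nil => rfl
  | cons c cs' ih =>
    simp only [List.flatMap_cons]
    rw [ih (fun c' hc' => h c' (List.mem_cons_of_mem _ hc'))]
    rw [List.filter_append]
    have : ([x].filter (fun p => decide (p.2 = c))) = [] := by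
      simp [List.filter, h c List.mem_cons_self]
    rw [this, List.append_nil]

theorem insert_flatMap (cs : List Int) (l : List (Int × Int)) (x : Int × Int)
    (hps : cs.Pairwise (fun a b => b < a)) (hx : x.2 ∈ cs) :
    PySem.List.insertBy (fun a b => decide (b.2 < a.2)) x
        (cs.flatMap (fun c => l.filter (fun p => decide (p.2 = c))))
      = cs.flatMap (fun c => (l ++ [x]).filter (fun p => decide (p.2 = c))) := by
  induction cs with
  | nil => cases hx
  | cons c cs' ih =>
    have hlt : ∀ c' ∈ cs', c' < c := fun c' hc' => (List.pairwise_cons.mp hps).1 c' hc'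
    have hskip : ∀ y ∈ l.filter (fun p => decide (p.2 = c)),
        (fun a b => decide (b.2 < (a : Int × Int).2)) x y = false := by
      intro y hy
      have hy2 : y.2 = c := by simpa using (List.mem_filter.mp hy).2
      by_cases hc : x.2 = c
      · simp [hy2, hc]
      · have hx' : x.2 ∈ cs' := by
          rcases List.mem_cons.mp hx with h | h
          · exact absurd h hc
          · exact h
        have : x.2 < c := hlt _ hx'
        simp [hy2]; omega
    simp only [List.flatMap_cons]
    rw [insertBy_append_not _ _ _ _ hskip]
    by_cases hc : x.2 = c
    · have hfront : ∀ y ∈ cs'.flatMap (fun c => l.filter (fun p => decide (p.2 = c))),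
          (fun a b => decide (b.2 < (a : Int × Int).2)) x y = true := by
        intro y hy
        rcases List.mem_flatMap.mp hy with ⟨c', hc', hy'⟩
        have hy2 : y.2 = c' := by simpa using (List.mem_filter.mp hy').2
        have : c' < c := hlt _ hc'
        simp [hy2, hc]; omega
      rw [insertBy_front _ _ _ hfront]
      have hxfil : ([x].filter (fun p => decide (p.2 = c))) = [x] := by simp [List.filter, hc]
      rw [List.filter_append, hxfil]
      rw [flatMap_filter_irrelevant cs' l x (fun c' hc' => by
        intro he; exact absurd (he ▸ hc ▸ rfl : (c:Int) = c') (by have := hlt _ hc'; omega))]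
      simp
    · have hx' : x.2 ∈ cs' := by
        rcases List.mem_cons.mp hx with h | h
        · exact absurd h hc
        · exact h
      rw [ih (List.pairwise_cons.mp hps).2 hx']
      have hxfil : ([x].filter (fun p => decide (p.2 = c))) = [] := by simp [List.filter, hc]
      rw [List.filter_append (l₁ := l), hxfil, List.append_nil]

theorem sorted_rev_flatMap (l : List (Int × Int)) (cs : List Int)
    (hps : cs.Pairwise (fun a b => b < a)) (hmem : ∀ p ∈ l, p.2 ∈ cs) :
    PySem.List.sorted l (fun x => x.2) true
      = cs.flatMap (fun c => l.filter (fun p => decide (p.2 = c))) := by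
  induction l using List.reverseRecOn with
  | nil =>
    rw [PySem.List.sorted_rev_eq_foldl_insertBy]
    simp
  | append_singleton l x ih =>
    rw [PySem.List.sorted_rev_eq_foldl_insertBy, List.foldl_append,
      ← PySem.List.sorted_rev_eq_foldl_insertBy]
    simp only [List.foldl_cons, List.foldl_nil]
    rw [ih (fun p hp => hmem p (List.mem_append_left _ hp))]
    exact insert_flatMap cs l x hps (hmem x (List.mem_append_right _ List.mem_cons_self))

-- the bucket-filling fold, characterised pointwise
theorem fill_spec (l : List (Int × Int)) (bks : List (List Int))
    (h : ∀ p ∈ l, 0 ≤ p.2 ∧ p.2 < (bks.length : Int)) :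
    l.foldl (fun bks p => PySem.List.pySetD bks p.2 (PySem.List.pyGetD bks p.2 [] ++ [p.1])) bks
      = (List.range bks.length).map
          (fun j => bks.getD j [] ++ (l.filter (fun q => decide (q.2 = (j : Int)))).map Prod.fst) := by
  induction l generalizing bks with
  | nil =>
    simp only [List.foldl_nil, List.filter_nil, List.map_nil, List.append_nil]
    apply List.ext_getElem (by simp)
    intro i h1 h2
    simp only [List.getElem_map, List.getElem_range]
    rw [List.getD_eq_getElem _ _ (by simpa using h2)]
  | cons p l ih =>
    obtain ⟨hp0, hp1⟩ := h p List.mem_cons_self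
    have hk : p.2.toNat < bks.length := by omega
    have hset : PySem.List.pySetD bks p.2 (PySem.List.pyGetD bks p.2 [] ++ [p.1])
        = bks.set p.2.toNat (bks.getD p.2.toNat [] ++ [p.1]) := by
      rw [PySem.List.pyGetD_eq_getElem _ _ hp0 hp1]
      simp only [PySem.List.pySetD, PySem.List.pySet?, PySem.List.pyIdx?, if_pos hp0, if_pos hp1]
      rw [List.getD_eq_getElem _ _ hk]
      rfl
    simp only [List.foldl_cons]
    rw [hset, ih _ (by
      intro q hq
      have := h q (List.mem_cons_of_mem _ hq)
      simpa using this)]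
    rw [List.length_set]
    apply List.map_congr_left
    intro j hj
    have hjlen : j < bks.length := List.mem_range.mp hj
    rw [List.getD_eq_getElem?_getD, List.getElem?_set]
    by_cases hje : p.2.toNat = j
    · rw [if_pos hje, if_pos (hje ▸ hk)]
      subst hje
      simp only [Option.getD_some]
      rw [List.getD_eq_getElem _ _ hk]
      have hfil : (p :: l).filter (fun q => decide (q.2 = (p.2.toNat : Int)))
          = p :: l.filter (fun q => decide (q.2 = (p.2.toNat : Int))) := by
        simp [Int.toNat_of_nonneg hp0]
      rw [hfil]
      simp [List.append_assoc]
    · rw [if_neg hje, List.getElem?_eq_getElem hjlen]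
      simp only [Option.getD_some]
      rw [List.getD_eq_getElem _ _ hjlen]
      have hfil : (p :: l).filter (fun q => decide (q.2 = (j : Int)))
          = l.filter (fun q => decide (q.2 = (j : Int))) := by
        have hne : ¬ p.2 = (j : Int) := by
          intro he
          apply hje
          omega
        simp [hne]
      rw [hfil]

theorem foldl_append_eq_flatten {α : Type} (L : List (List α)) (acc : List α) :
    L.foldl (fun a b => a ++ b) acc = acc ++ L.flatten := by
  induction L generalizing acc with
  | nil => simp
  | cons x t ih => simp [ih]

theorem values_eq_map_snd (d : PySem.Dict Int Int) : d.values = d.items.map Prod.snd := by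
  simp [PySem.Dict.values]

-- ===== VERDICT (by name: the statement is the Claim_ definition above) =====
theorem solution_spec : Claim_equal_solution := by
  intro s _
  unfold Spec_solution
  unfold solution solution_alt
  simp only []
  rw [foldlA_eq_pvRuns s.toList [] 0, foldlB_eq s.toList PySem.Dict.empty 0 le_rfl]
  simp only [List.nil_append]
  rw [← PySem.Dict.counter_eq_foldl]
  set items := (PySem.Dict.counter (pvRuns s.toList 0)).items with hitems
  rw [PySem.List.foldl_append_singleton_eq_map]
  simp only [List.nil_append]
  cases hM : PySem.List.max? (PySem.Dict.counter (pvRuns s.toList 0)).values (fun v => v) with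
  | none =>
    have hvals : (PySem.Dict.counter (pvRuns s.toList 0)).values = [] :=
      (PySem.List.max?_eq_none_iff _ _).mp hM
    have hit : items = [] := by
      have := values_eq_map_snd (PySem.Dict.counter (pvRuns s.toList 0))
      rw [hvals] at this
      rw [hitems]
      exact (List.map_eq_nil_iff.mp this.symm)
    rw [hit, PySem.List.sorted_rev_eq_foldl_insertBy]
    simp
  | some M =>
    simp only []
    -- facts about the counts
    have hvals_le : ∀ p ∈ items, p.2 ≤ M := by
      intro p hp
      have : p.2 ∈ (PySem.Dict.counter (pvRuns s.toList 0)).values := by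
        rw [values_eq_map_snd]
        exact List.mem_map_of_mem hp
      exact PySem.List.max?_isMax hM _ this
    have hvals_pos : ∀ p ∈ items, 1 ≤ p.2 := by
      intro p hp
      rw [hitems, PySem.Dict.items_counter] at hp
      rcases List.mem_map.mp hp with ⟨k, hk, hkp⟩
      have hkmem : k ∈ pvRuns s.toList 0 := (PySem.Set.mem_ofList _ _).mp hk
      have : 0 < (pvRuns s.toList 0).count k := List.count_pos_iff.mpr hkmem
      rw [← hkp]
      simpa using this
    have hM1 : 1 ≤ M := by
      have hMmem := PySem.List.max?_mem hM
      rw [values_eq_map_snd] at hMmem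
      rcases List.mem_map.mp hMmem with ⟨p, hp, hpM⟩
      rw [← hpM]
      exact hvals_pos p hp
    set n : Nat := (M + 1).toNat with hn
    have hnM : ((n : Nat) : Int) = M + 1 := by omega
    -- the initial buckets are n empty lists
    have hbuck : (PySem.List.pyRange 0 (M + 1) 1).map (fun _ => ([] : List Int))
        = List.replicate n ([] : List Int) := by
      rw [← hnM, PySem.List.pyRange_zero_natCast, List.map_map]
      show List.map (fun _ => ([] : List Int)) (List.range n) = List.replicate n []
      rw [List.map_const', List.length_range]
    rw [hbuck]
    -- bucket filling
    rw [fill_spec items (List.replicate n []) (by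
      intro p hp
      have h1 := hvals_pos p hp
      have h2 := hvals_le p hp
      simp only [List.length_replicate]
      omega)]
    simp only [List.length_replicate]
    have hmapbody : (List.range n).map
          (fun (j : Nat) => (List.replicate n ([] : List Int)).getD j [] ++
            ((items.filter (fun q => decide (q.2 = (j : Int)))).map Prod.fst))
        = (List.range n).map
          (fun (j : Nat) => (items.filter (fun q => decide (q.2 = (j : Int)))).map Prod.fst) := by
      apply List.map_congr_left
      intro j hj
      rw [List.getD_replicate _ (List.mem_range.mp hj)]
      simp
    rw [hmapbody]
    -- emission: reverse + concat = flatMap over descending counts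
    rw [foldl_append_eq_flatten, List.nil_append, ← List.map_reverse, ← List.flatMap_def]
    -- A-side: sorted = flatMap over the descending count list
    have hpair : ((List.range n).reverse.map (fun (j : Nat) => (j : Int))).Pairwise
        (fun a b => b < a) := by
      apply List.Pairwise.map (R := fun (a b : Nat) => b < a)
      · intro a b hba
        exact_mod_cast hba
      · rw [List.pairwise_reverse]
        exact List.pairwise_lt_range (n := n)
    have hsorted := sorted_rev_flatMap items ((List.range n).reverse.map (fun (j : Nat) => (j : Int)))
      hpair
      (by
        intro p hp
        have h1 := hvals_pos p hp
        have h2 := hvals_le p hp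
        apply List.mem_map.mpr
        refine ⟨p.2.toNat, ?_, by omega⟩
        rw [List.mem_reverse]
        apply List.mem_range.mpr
        omega)
    rw [hsorted, List.map_flatMap, List.flatMap_map]
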